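-- pv_equiv track=rewrite | github.com/damadorPL/reloaded | zad10.py | _find_related_facts
-- ===== SOURCE A (Python) =====
-- from typing import Optional, Dict, Set, Tuple, List
--
-- def _find_related_facts(people_in_report: Set[str], facts_map: Dict[str, str]) -> List[str]:
--     """Helper function to find facts related to people in report"""
--     related_facts = []
--     for fact_key, fact_text in facts_map.items():
--         for person in people_in_report:
--             if person in fact_text.lower():
--                 related_facts.append(fact_text)
--                 break
--     return related_facts
-- ===== SOURCE B (Python) =====
-- def _find_related_facts(people_in_report, facts_map):
--     """Person-outer scan over a shrinking pool of not-yet-matched facts: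
--     each fact text is lowercased once; once a fact is matched it leaves the
--     pool, so it is never tested again. Matched facts are emitted in the
--     original facts_map order."""
--     values = list(facts_map.values())
--     lows = [text.lower() for text in values]
--     hit = [False] * len(values)
--     remaining = list(range(len(values)))
--     for person in people_in_report:
--         still = []
--         for i in remaining:
--             if person in lows[i]:
--                 hit[i] = True
--             else:
--                 still.append(i)
--         remaining = still
--     return [text for text, h in zip(values, hit) if h]
-- ===== Notes on version B (the rewrite author's own statement) =====
-- stated objective: faster
-- what changed: B inverts the loop nest: each fact text is lowercased once up front, then a person-outer pass scans a shrinking pool of not-yet-matched fact indices (a matched fact leaves the pool), and the marked facts are emitted in the original order; A's fact-outer loop recomputes fact_text.lower() for every (fact, person) pair.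
import Mathlib
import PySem

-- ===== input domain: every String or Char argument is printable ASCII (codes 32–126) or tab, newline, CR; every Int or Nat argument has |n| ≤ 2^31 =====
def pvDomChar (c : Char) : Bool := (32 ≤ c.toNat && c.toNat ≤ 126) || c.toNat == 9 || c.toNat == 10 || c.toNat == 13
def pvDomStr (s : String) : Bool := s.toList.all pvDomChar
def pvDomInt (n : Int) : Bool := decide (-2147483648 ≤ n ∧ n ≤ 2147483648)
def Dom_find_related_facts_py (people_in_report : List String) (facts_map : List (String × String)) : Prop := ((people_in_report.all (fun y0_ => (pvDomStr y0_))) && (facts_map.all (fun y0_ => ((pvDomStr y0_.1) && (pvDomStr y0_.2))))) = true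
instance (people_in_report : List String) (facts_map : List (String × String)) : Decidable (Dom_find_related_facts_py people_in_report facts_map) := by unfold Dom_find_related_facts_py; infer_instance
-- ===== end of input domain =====

-- B inverts A's loop nest (person-outer pass over a shrinking pool of unmatched facts, one lower() per fact) so each fact is lowercased once; return values proved equal.


-- ===== PORT A =====
-- inner 'for person in people_in_report: if person in fact_text.lower(): append; break'
def aInnerLoop (fact_text : String) (acc : List String) : List String → List String
  | [] => acc
  | person :: rest =>
    if PySem.Str.isIn person (PySem.Str.lower fact_text) then acc ++ [fact_text]
    else aInnerLoop fact_text acc rest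

def find_related_facts_py (people_in_report : List String) (facts_map : List (String × String)) : List String :=
  facts_map.foldl (fun related_facts kv => aInnerLoop kv.2 related_facts people_in_report) []

-- ===== PORT B =====
-- inner 'for i in remaining: if person in lows[i]: hit[i] = True else: still.append(i)'
-- (state = (hit, still); lows[i] is read with List.getD — i comes from range(len(lows)), always in range)
def bInnerLoop (person : String) (lows : List String) : List Bool × List Nat → List Nat → List Bool × List Nat
  | (hit, still), [] => (hit, still)
  | (hit, still), i :: rest =>
    if PySem.Str.isIn person (lows.getD i "") then bInnerLoop person lows (hit.set i true, still) rest
    else bInnerLoop person lows (hit, still ++ [i]) rest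

def find_related_facts_py_alt (people_in_report : List String) (facts_map : List (String × String)) : List String :=
  let values := facts_map.map Prod.snd
  let lows := values.map (fun text => PySem.Str.lower text)
  let st := people_in_report.foldl
    (fun st person => bInnerLoop person lows (st.1, []) st.2)
    (List.replicate values.length false, List.range values.length)
  ((values.zip st.1).filter (fun th => th.2)).map (fun th => th.1)

-- ===== PRECONDITION & SPEC =====
def Spec_find_related_facts_py (people_in_report : List String) (facts_map : List (String × String)) (out : List String) : Prop := out = find_related_facts_py_alt people_in_report facts_map
instance (people_in_report : List String) (facts_map : List (String × String)) (out : List String) : Decidable (Spec_find_related_facts_py people_in_report facts_map out) := by unfold Spec_find_related_facts_py; infer_instance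

-- ===== CLAIM (what is proved, stated in full; the proofs are below) =====
def Claim_equal_find_related_facts_py : Prop := ∀ (people_in_report : List String) (facts_map : List (String × String)), Dom_find_related_facts_py people_in_report facts_map → Spec_find_related_facts_py people_in_report facts_map (find_related_facts_py people_in_report facts_map)

-- ===== LEMMAS AND PROOFS =====

-- A's inner loop returns acc ++ [text] iff some person matches
theorem aInnerLoop_eq (text : String) (acc : List String) (ps : List String) :
    aInnerLoop text acc ps =
      if ps.any (fun p => PySem.Str.isIn p (PySem.Str.lower text)) then acc ++ [text] else acc := by
  induction ps with
  | nil => simp [aInnerLoop]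
  | cons p rest ih =>
    simp only [aInnerLoop, ih, List.any_cons]
    by_cases h : PySem.Str.isIn p (PySem.Str.lower text) = true <;> simp_all

-- B's inner loop splits into a set-fold on hit and a filter on the pool
theorem bInnerLoop_split (person : String) (lows : List String) :
    ∀ (rs : List Nat) (hit : List Bool) (still : List Nat),
      bInnerLoop person lows (hit, still) rs =
        (rs.foldl (fun h i => if PySem.Str.isIn person (lows.getD i "") then h.set i true else h) hit,
         still ++ rs.filter (fun i => !PySem.Str.isIn person (lows.getD i ""))) := by
  intro rs
  induction rs with
  | nil => intro hit still; simp [bInnerLoop]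
  | cons i rest ih =>
    intro hit still
    by_cases h : PySem.Str.isIn person (lows.getD i "") = true <;>
      simp_all [bInnerLoop, List.append_assoc]

-- elementwise description of the set-fold
theorem setFold_getElem? (t : Nat → Bool) :
    ∀ (rs : List Nat) (hit : List Bool) (j : Nat),
      (rs.foldl (fun h i => if t i then h.set i true else h) hit)[j]? =
        if j ∈ rs ∧ t j = true ∧ j < hit.length then some true else hit[j]? := by
  intro rs
  induction rs with
  | nil => intro hit j; simp
  | cons i rest ih =>
    intro hit j
    simp only [List.foldl_cons]
    by_cases hti : t i = true
    · rw [if_pos hti, ih, List.length_set, List.getElem?_set]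
      by_cases hij : i = j
      · subst hij
        by_cases hlen : i < hit.length
        · by_cases hjr : i ∈ rest ∧ t i = true ∧ i < hit.length <;>
            simp_all [List.mem_cons]
        · have hnone : hit[i]? = none := List.getElem?_eq_none (by omega)
          simp_all [List.mem_cons]
      · simp only [if_neg hij]
        by_cases hjr : j ∈ rest ∧ t j = true ∧ j < hit.length
        · obtain ⟨h1, h2, h3⟩ := hjr
          simp [h1, h2, h3]
        · have hn : ¬(j ∈ i :: rest ∧ t j = true ∧ j < hit.length) := by
            simp only [List.mem_cons]
            rintro ⟨h1 | h1, h2, h3⟩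
            · exact hij h1.symm
            · exact hjr ⟨h1, h2, h3⟩
          simp only [hjr, if_false]
          rw [if_neg hn]
    · rw [if_neg hti, ih]
      by_cases hjr : j ∈ rest ∧ t j = true ∧ j < hit.length
      · obtain ⟨h1, h2, h3⟩ := hjr
        simp [h1, h2, h3]
      · have hn : ¬(j ∈ i :: rest ∧ t j = true ∧ j < hit.length) := by
          simp only [List.mem_cons]
          rintro ⟨h1 | h1, h2, h3⟩
          · subst h1; exact hti h2
          · exact hjr ⟨h1, h2, h3⟩
        simp only [hjr, if_false]
        rw [if_neg hn]

-- the set-fold over the unmatched indices of range n, in closed form (pure, no strings)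
theorem setFold_filter_range (n : Nat) (g t : Nat → Bool) :
    ((List.range n).filter (fun i => !g i)).foldl
        (fun h i => if t i then h.set i true else h) ((List.range n).map g)
      = (List.range n).map (fun i => g i || t i) := by
  apply List.ext_getElem?
  intro j
  rw [setFold_getElem? t]
  by_cases hj : j < n
  · have hmem : j ∈ (List.range n).filter (fun i => !g i) ↔ g j = false := by
      simp [List.mem_filter, List.mem_range, hj]
    by_cases hg : g j = true <;> by_cases ht : t j = true
    all_goals simp_all
  · have h1 : ((List.range n).map g)[j]? = none := List.getElem?_eq_none (by simpa using hj)
    have h2 : ((List.range n).map (fun i => g i || t i))[j]? = none :=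
      List.getElem?_eq_none (by simpa using hj)
    have hcond : ¬(j ∈ (List.range n).filter (fun i => !g i) ∧ t j = true ∧
        j < ((List.range n).map g).length) := by
      intro ⟨_, _, h3⟩; simp at h3; omega
    rw [if_neg hcond, h1, h2]

-- one person's pass over the pool, in closed form over the full index range
theorem bStep_eq (person : String) (lows : List String) (g : Nat → Bool) :
    bInnerLoop person lows ((List.range lows.length).map g, [])
        ((List.range lows.length).filter (fun i => !g i)) =
      ((List.range lows.length).map (fun i => g i || PySem.Str.isIn person (lows.getD i "")),
       (List.range lows.length).filter
         (fun i => !(g i || PySem.Str.isIn person (lows.getD i "")))) := by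
  rw [bInnerLoop_split]
  simp only [Prod.mk.injEq]
  refine ⟨?_, ?_⟩
  · exact setFold_filter_range lows.length g (fun i => PySem.Str.isIn person (lows.getD i ""))
  · rw [List.nil_append, List.filter_filter]
    apply List.filter_congr
    intro i _
    cases g i <;> cases PySem.Str.isIn person (lows.getD i "") <;> rfl

-- the whole person-outer fold, in closed form
theorem bOuter_eq (lows : List String) :
    ∀ (ps : List String) (g : Nat → Bool),
      ps.foldl (fun st person => bInnerLoop person lows (st.1, []) st.2)
          ((List.range lows.length).map g, (List.range lows.length).filter (fun i => !g i)) =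
        ((List.range lows.length).map
           (fun i => g i || ps.any (fun p => PySem.Str.isIn p (lows.getD i ""))),
         (List.range lows.length).filter
           (fun i => !(g i || ps.any (fun p => PySem.Str.isIn p (lows.getD i ""))))) := by
  intro ps
  induction ps with
  | nil => intro g; simp
  | cons p rest ih =>
    intro g
    simp only [List.foldl_cons, bStep_eq]
    rw [ih (fun i => g i || PySem.Str.isIn p (lows.getD i ""))]
    simp only [Prod.mk.injEq]
    refine ⟨?_, ?_⟩
    · apply List.map_congr_left
      intro i _
      simp [List.any_cons, Bool.or_assoc]
    · apply List.filter_congr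
      intro i _
      simp [List.any_cons, Bool.or_assoc]

-- zipping values with position-indexed flags is filtering the values
theorem zip_range_filter :
    ∀ (vs : List String) (F : Nat → Bool) (Q : String → Bool),
      (∀ i, (h : i < vs.length) → F i = Q vs[i]) →
      (((vs.zip ((List.range vs.length).map F)).filter (fun th => th.2)).map (fun th => th.1)
        = vs.filter Q) := by
  intro vs
  induction vs with
  | nil => intro F Q _; rfl
  | cons v vs ih =>
    intro F Q hFQ
    have h0 : F 0 = Q v := hFQ 0 (by simp)
    have hrange : (List.range (vs.length + 1)).map F =
        F 0 :: (List.range vs.length).map (fun i => F (i + 1)) := by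
      rw [List.range_succ_eq_map]
      simp [List.map_map, Function.comp, Nat.succ_eq_add_one]
    simp only [List.length_cons, hrange, List.zip_cons_cons]
    have ih' := ih (fun i => F (i + 1)) Q (fun i h => hFQ (i + 1) (by simpa using Nat.succ_lt_succ h))
    by_cases hq : Q v = true
    · simp [h0, hq, ih']
    · have : Q v = false := by simpa using hq
      simp [h0, this, ih']

-- ===== VERDICT (by name: the statement is the Claim_ definition above) =====
theorem find_related_facts_py_spec : Claim_equal_find_related_facts_py := by
  intro people facts _
  unfold Spec_find_related_facts_py find_related_facts_py
  -- A's loop = filter by 'some person matches'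
  have hA : facts.foldl (fun related_facts kv => aInnerLoop kv.2 related_facts people) []
      = (facts.map Prod.snd).filter
          (fun text => people.any (fun p => PySem.Str.isIn p (PySem.Str.lower text))) := by
    have h1 := PySem.List.foldl_append_if
      (l := facts)
      (p := fun kv => people.any (fun p => PySem.Str.isIn p (PySem.Str.lower kv.2)))
      (f := Prod.snd) (acc := ([] : List String))
    simp only [List.nil_append] at h1
    rw [List.filter_map]
    simp only [Function.comp_def]
    rw [← h1]
    apply List.foldl_ext
    intro acc kv _
    rw [aInnerLoop_eq]
  rw [hA]
  -- B's lets, zeta-reduced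
  have halt : find_related_facts_py_alt people facts =
      (((facts.map Prod.snd).zip
          (people.foldl
            (fun st person =>
              bInnerLoop person ((facts.map Prod.snd).map (fun text => PySem.Str.lower text))
                (st.1, []) st.2)
            (List.replicate (facts.map Prod.snd).length false,
             List.range (facts.map Prod.snd).length)).1).filter
        (fun th => th.2)).map (fun th => th.1) := rfl
  rw [halt]
  set lows := (facts.map Prod.snd).map (fun text => PySem.Str.lower text) with hl
  have hlen : lows.length = (facts.map Prod.snd).length := by simp [hl]
  have hinit : (List.replicate (facts.map Prod.snd).length false,
      List.range (facts.map Prod.snd).length)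
      = ((List.range lows.length).map (fun _ => false),
         (List.range lows.length).filter (fun i => !(false : Bool))) := by
    simp only [Prod.mk.injEq]
    refine ⟨?_, ?_⟩
    · rw [hlen]
      exact ((List.map_const (l := List.range (facts.map Prod.snd).length)
        (b := false)).trans (by simp)).symm
    · simp [hlen]
  rw [hinit, bOuter_eq lows people (fun _ => false)]
  simp only [Bool.false_or]
  have hFQ : ∀ i, (h : i < (facts.map Prod.snd).length) →
      (people.any (fun p => PySem.Str.isIn p (lows.getD i "")))
        = (fun text => people.any (fun p => PySem.Str.isIn p (PySem.Str.lower text)))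
            ((facts.map Prod.snd)[i]) := by
    intro i hi
    have hi' : i < lows.length := by rw [hlen]; exact hi
    have hgd : lows.getD i "" = PySem.Str.lower (facts.map Prod.snd)[i] := by
      rw [List.getD_eq_getElem?_getD, List.getElem?_eq_getElem hi']
      simp [hl]
    rw [hgd]
  have hz := zip_range_filter (facts.map Prod.snd)
    (fun i => people.any (fun p => PySem.Str.isIn p (lows.getD i "")))
    (fun text => people.any (fun p => PySem.Str.isIn p (PySem.Str.lower text))) hFQ
  rw [hlen, hz]
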